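-- pv_equiv track=rewrite | github.com/Henrique-Liesenfeld-Krever/Bidimensional-Parity | paridadeBidimensional.py | insere_paridade
-- ===== SOURCE A (Python) =====
-- def insere_paridade(matriz,rows,columns,paridade_linhas,paridade_colunas):
--     contador=0
--     for i in range(rows):
--         for j in range(columns):
--             if matriz[i][j]==1:
--                 contador+=1
--         if contador%2==1:
--             contador=0
--             matriz[i][columns]=1
--             paridade_linhas+=1
--
--     contador=0
--     for i in range(columns):
--         for j in range(rows):
--             if matriz[j][i]==1:
--                 contador+=1
--         if contador%2==1:
--             contador=0
--             matriz[rows][i]=1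
--             paridade_colunas+=1
--
--     return(paridade_linhas,paridade_colunas)
-- ===== SOURCE B (Python) =====
-- def insere_paridade(matriz, rows, columns, paridade_linhas, paridade_colunas):
--     # Single pass over the rows: decide each row's parity bit directly from its
--     # own ones-count, and toggle the column parities on the fly, so the
--     # column-major second scan of the matrix disappears.
--     col_odd = [False] * columns
--     for i in range(rows):
--         ones = 0
--         for j in range(columns):
--             if matriz[i][j] == 1:
--                 ones += 1
--                 col_odd[j] = not col_odd[j]
--         if ones % 2 == 1:
--             matriz[i][columns] = 1
--             paridade_linhas += 1
--     for j in range(columns):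
--         if col_odd[j]:
--             matriz[rows][j] = 1
--             paridade_colunas += 1
--     return (paridade_linhas, paridade_colunas)
-- ===== Notes on version B (the rewrite author's own statement) =====
-- stated objective: alternative
-- what changed: B replaces A's stateful running counter (reset only when odd) and its second column-major nested scan of the matrix by a single row-major pass that takes each row's own ones-count and maintains a column-parity bit table on the fly; a final scan over that table emits the column parity bits.
import Mathlib
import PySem

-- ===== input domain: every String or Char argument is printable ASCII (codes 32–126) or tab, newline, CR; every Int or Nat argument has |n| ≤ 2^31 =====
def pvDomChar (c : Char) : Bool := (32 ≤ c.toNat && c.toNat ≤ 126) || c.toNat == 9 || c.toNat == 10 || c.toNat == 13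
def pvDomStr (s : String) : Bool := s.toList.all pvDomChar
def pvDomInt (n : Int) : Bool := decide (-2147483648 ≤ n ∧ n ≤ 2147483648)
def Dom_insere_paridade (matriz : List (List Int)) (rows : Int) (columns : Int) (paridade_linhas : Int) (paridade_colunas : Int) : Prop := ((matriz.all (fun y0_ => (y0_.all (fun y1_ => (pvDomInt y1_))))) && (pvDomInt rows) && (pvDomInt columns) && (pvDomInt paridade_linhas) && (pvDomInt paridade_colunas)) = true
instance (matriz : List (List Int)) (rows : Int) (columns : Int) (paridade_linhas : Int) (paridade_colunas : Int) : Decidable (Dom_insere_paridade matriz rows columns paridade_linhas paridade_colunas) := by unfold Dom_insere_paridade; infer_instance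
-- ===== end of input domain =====

-- B folds row parity and column parity into one row-major pass over the matrix (plus a final
-- O(columns) emit loop), replacing A's running counter and second column-major scan; equal return
-- value proved on Pre_ (A also writes parity bits into matriz in place — both Pythons perform the
-- same mutation; the Lean claim is about the RETURN value only).


-- ===== PORT A =====
-- Literal port of A; the in-place writes matriz[i][columns]=1 / matriz[rows][i]=1 are never read
-- back by A (row loop reads columns j < columns, column loop reads rows j < rows), so the returned
-- pair is computed exactly as A computes it.  '% 2' is exact: Python % agrees with Int.emod for the
-- positive divisor 2.  Reads use pyGetD; inside Pre_ every executed read is in range.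
def insere_paridade (matriz : List (List Int)) (rows : Int) (columns : Int) (paridade_linhas : Int) (paridade_colunas : Int) : Int × Int :=
  let s1 : Int × Int :=
    (PySem.List.pyRange 0 rows 1).foldl
      (fun (st : Int × Int) i =>
        let contador :=
          (PySem.List.pyRange 0 columns 1).foldl
            (fun c j => if PySem.List.pyGetD (PySem.List.pyGetD matriz i []) j 0 == 1 then c + 1 else c)
            st.1
        if contador % 2 == 1 then ((0 : Int), st.2 + 1) else (contador, st.2))
      (0, paridade_linhas)
  let s2 : Int × Int :=
    (PySem.List.pyRange 0 columns 1).foldl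
      (fun (st : Int × Int) i =>
        let contador :=
          (PySem.List.pyRange 0 rows 1).foldl
            (fun c j => if PySem.List.pyGetD (PySem.List.pyGetD matriz j []) i 0 == 1 then c + 1 else c)
            st.1
        if contador % 2 == 1 then ((0 : Int), st.2 + 1) else (contador, st.2))
      (0, paridade_colunas)
  (s1.2, s2.2)

-- ===== PORT B =====
-- Literal port of Source B.  '[False] * columns' is 'List.replicate columns.toNat false' (negative
-- multiplier gives the empty list, as in Python).  'col_odd[j] = not col_odd[j]' is an in-range
-- assignment (0 ≤ j < columns = len col_odd always), so List.set at j.toNat is exact.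
def insere_paridade_alt (matriz : List (List Int)) (rows : Int) (columns : Int) (paridade_linhas : Int) (paridade_colunas : Int) : Int × Int :=
  let colOdd0 : List Bool := List.replicate columns.toNat false
  let s1 : List Bool × Int :=
    (PySem.List.pyRange 0 rows 1).foldl
      (fun (st : List Bool × Int) i =>
        let inner : Int × List Bool :=
          (PySem.List.pyRange 0 columns 1).foldl
            (fun (p : Int × List Bool) j =>
              if PySem.List.pyGetD (PySem.List.pyGetD matriz i []) j 0 == 1 then
                (p.1 + 1, p.2.set j.toNat (!(p.2.getD j.toNat false)))
              else p)
            (0, st.1)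
        if inner.1 % 2 == 1 then (inner.2, st.2 + 1) else (inner.2, st.2))
      (colOdd0, paridade_linhas)
  let pc : Int :=
    (PySem.List.pyRange 0 columns 1).foldl
      (fun acc j => if s1.1.getD j.toNat false then acc + 1 else acc)
      paridade_colunas
  (s1.2, pc)

-- ===== PRECONDITION & SPEC =====
-- Pre_ is exactly the set of inputs on which Python A returns (no IndexError): with positive rows
-- and columns, the scanned rows*columns region must exist, and every parity slot A actually writes
-- must exist — slot matriz[i][columns] for each row i with an odd ones-count, and slot
-- matriz[rows][k] for each column k with an odd ones-count.
def Pre_insere_paridade (matriz : List (List Int)) (rows : Int) (columns : Int) (paridade_linhas : Int) (paridade_colunas : Int) : Prop :=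
  rows ≤ 0 ∨ columns ≤ 0 ∨
    (rows ≤ (matriz.length : Int) ∧
     (∀ row ∈ matriz.take rows.toNat, columns ≤ (row.length : Int)) ∧
     (∀ row ∈ matriz.take rows.toNat,
        ((row.take columns.toNat).countP (fun v => v == 1)) % 2 = 1 → columns + 1 ≤ (row.length : Int)) ∧
     (∀ k ∈ List.range columns.toNat,
        ((matriz.take rows.toNat).countP (fun row => row.getD k 0 == 1)) % 2 = 1 →
          rows + 1 ≤ (matriz.length : Int) ∧ (k : Int) + 1 ≤ ((matriz.getD rows.toNat []).length : Int)))
instance (matriz : List (List Int)) (rows : Int) (columns : Int) (paridade_linhas : Int) (paridade_colunas : Int) : Decidable (Pre_insere_paridade matriz rows columns paridade_linhas paridade_colunas) := by unfold Pre_insere_paridade; infer_instance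

def pvWitness_insere_paridade : List (List Int) × Int × Int × Int × Int :=
  ([[1, 0], [0, 0]], 1, 1, 0, 0)

def Spec_insere_paridade (matriz : List (List Int)) (rows : Int) (columns : Int) (paridade_linhas : Int) (paridade_colunas : Int) (out : Int × Int) : Prop := out = insere_paridade_alt matriz rows columns paridade_linhas paridade_colunas
instance (matriz : List (List Int)) (rows : Int) (columns : Int) (paridade_linhas : Int) (paridade_colunas : Int) (out : Int × Int) : Decidable (Spec_insere_paridade matriz rows columns paridade_linhas paridade_colunas out) := by unfold Spec_insere_paridade; infer_instance

-- ===== CLAIM (what is proved, stated in full; the proofs are below) =====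
def Claim_equal_insere_paridade : Prop := ∀ (matriz : List (List Int)) (rows : Int) (columns : Int) (paridade_linhas : Int) (paridade_colunas : Int), Dom_insere_paridade matriz rows columns paridade_linhas paridade_colunas → Pre_insere_paridade matriz rows columns paridade_linhas paridade_colunas → Spec_insere_paridade matriz rows columns paridade_linhas paridade_colunas (insere_paridade matriz rows columns paridade_linhas paridade_colunas)

-- ===== LEMMAS AND PROOFS =====

-- A's emitting loop: starting from an even counter, the running counter with reset-on-odd emits
-- exactly on the elements whose own count is odd.
theorem pvLoopA (cnt : Int → Int) (l : List Int) :
    ∀ (c0 pl : Int), c0 % 2 = 0 →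
      (l.foldl (fun (st : Int × Int) i =>
          if (st.1 + cnt i) % 2 == 1 then ((0 : Int), st.2 + 1) else (st.1 + cnt i, st.2))
        (c0, pl)).2
      = l.foldl (fun p i => if cnt i % 2 == 1 then p + 1 else p) pl := by
  induction l with
  | nil => intro c0 pl h; rfl
  | cons i t ih =>
    intro c0 pl h
    simp only [List.foldl_cons]
    by_cases hc : (c0 + cnt i) % 2 = 1
    · have h1 : cnt i % 2 = 1 := by omega
      have e1 : ((c0 + cnt i) % 2 == 1) = true := by simp [hc]
      have e2 : (cnt i % 2 == 1) = true := by simp [h1]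
      simp only [e1, e2, if_true]
      exact ih 0 (pl + 1) (by decide)
    · have h1 : ¬ cnt i % 2 = 1 := by omega
      have h2 : (c0 + cnt i) % 2 = 0 := by omega
      have e1 : ((c0 + cnt i) % 2 == 1) = false := by simp [hc]
      have e2 : (cnt i % 2 == 1) = false := by simp [h1]
      simp only [e1, e2, if_false]
      exact ih _ pl h2

-- toggling at positions from l preserves the length of the bit table
theorem pvToggleLen (P : Int → Bool) (l : List Int) :
    ∀ (co : List Bool),
      (l.foldl (fun co j => if P j then co.set j.toNat (!(co.getD j.toNat false)) else co) co).length
        = co.length := by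
  induction l with
  | nil => intro co; rfl
  | cons j t ih =>
    intro co
    simp only [List.foldl_cons]
    by_cases h : P j
    · rw [if_pos h]; rw [ih]; exact List.length_set ..
    · rw [if_neg h]; exact ih co

-- toggling once at each position of a duplicate-free in-range list flips exactly the positions
-- satisfying P
theorem pvToggleGetD (P : Int → Bool) (l : List Int) :
    ∀ (co : List Bool) (k : Nat), l.Nodup → (∀ j ∈ l, 0 ≤ j ∧ j.toNat < co.length) →
      (l.foldl (fun co j => if P j then co.set j.toNat (!(co.getD j.toNat false)) else co) co).getD k false
      = xor (co.getD k false) (decide ((k : Int) ∈ l) && P (k : Int)) := by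
  induction l with
  | nil => intro co k _ _; simp
  | cons j t ih =>
    intro co k hnd hb
    obtain ⟨hj0, hjl⟩ := hb j (List.mem_cons_self ..)
    have hnd' := (List.nodup_cons.mp hnd).2
    have hjt := (List.nodup_cons.mp hnd).1
    simp only [List.foldl_cons]
    by_cases h : P j
    · rw [if_pos h]
      rw [ih (co.set j.toNat (!(co.getD j.toNat false))) k hnd'
        (by intro x hx; have := hb x (List.mem_cons_of_mem _ hx); simpa [List.length_set] using this)]
      by_cases hk : (k : Int) = j
      · have hkj : k = j.toNat := by omega
        have hkt : ¬ (k : Int) ∈ t := by rw [hk]; exact hjt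
        subst hkj
        rw [List.getD_eq_getElem?_getD, List.getElem?_set_self (by omega)]
        simp [hkt, hk, h, hjt, ← List.getD_eq_getElem?_getD]
      · have hkj : ¬ k = j.toNat := by omega
        rw [List.getD_eq_getElem?_getD, List.getElem?_set_ne (by omega)]
        simp only [← List.getD_eq_getElem?_getD]
        have : decide ((k : Int) ∈ j :: t) = decide ((k : Int) ∈ t) := by
          simp [List.mem_cons, hk]
        rw [this]
    · rw [if_neg h]
      rw [ih co k hnd' (by intro x hx; exact hb x (List.mem_cons_of_mem _ hx))]
      by_cases hk : (k : Int) = j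
      · simp [hk, h, List.mem_cons]
      · have : decide ((k : Int) ∈ j :: t) = decide ((k : Int) ∈ t) := by simp [List.mem_cons, hk]
        rw [this]

-- B's joint (count, toggle) inner loop is the count loop and the toggle loop run separately
theorem pvBInner (m : List (List Int)) (i : Int) (l : List Int) :
    ∀ (a : Int) (co : List Bool),
      l.foldl (fun (p : Int × List Bool) j =>
          if PySem.List.pyGetD (PySem.List.pyGetD m i []) j 0 == 1 then
            (p.1 + 1, p.2.set j.toNat (!(p.2.getD j.toNat false)))
          else p) (a, co)
      = (l.foldl (fun c j => if PySem.List.pyGetD (PySem.List.pyGetD m i []) j 0 == 1 then c + 1 else c) a,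
         l.foldl (fun co j => if PySem.List.pyGetD (PySem.List.pyGetD m i []) j 0 == 1 then
             co.set j.toNat (!(co.getD j.toNat false)) else co) co) := by
  induction l with
  | nil => intro a co; rfl
  | cons j t ih =>
    intro a co
    simp only [List.foldl_cons]
    by_cases h : PySem.List.pyGetD (PySem.List.pyGetD m i []) j 0 == 1
    · rw [if_pos h, if_pos h, if_pos h]; exact ih ..
    · rw [if_neg h, if_neg h, if_neg h]; exact ih ..

-- the column-parity bit table after all row toggles holds each column's ones-count parity
theorem pvRowsFold (m : List (List Int)) (columns : Int) (l : List Int) :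
    ∀ (co : List Bool) (k : Nat), co.length = columns.toNat → k < columns.toNat →
      (l.foldl (fun co i =>
          (PySem.List.pyRange 0 columns 1).foldl
            (fun co j => if PySem.List.pyGetD (PySem.List.pyGetD m i []) j 0 == 1 then
              co.set j.toNat (!(co.getD j.toNat false)) else co) co)
        co).getD k false
      = xor (co.getD k false)
          (decide (l.countP (fun i => PySem.List.pyGetD (PySem.List.pyGetD m i []) (k : Int) 0 == 1) % 2 = 1)) := by
  induction l with
  | nil => intro co k _ _; simp
  | cons i t ih =>
    intro co k hlen hk
    simp only [List.foldl_cons]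
    have hb : ∀ j ∈ PySem.List.pyRange 0 columns 1, 0 ≤ j ∧ j.toNat < co.length := by
      intro j hj
      rw [PySem.List.mem_pyRange_one] at hj
      exact ⟨hj.1, by rw [hlen]; omega⟩
    have hlen' : (((PySem.List.pyRange 0 columns 1).foldl
        (fun co j => if PySem.List.pyGetD (PySem.List.pyGetD m i []) j 0 == 1 then
          co.set j.toNat (!(co.getD j.toNat false)) else co) co)).length
        = columns.toNat := by
      rw [pvToggleLen]; exact hlen
    rw [ih _ k hlen' hk]
    rw [pvToggleGetD _ _ co k (PySem.List.nodup_pyRange_one 0 columns) hb]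
    have hmem : decide ((k : Int) ∈ PySem.List.pyRange 0 columns 1) = true := by
      simp [PySem.List.mem_pyRange_one]; omega
    rw [hmem]
    simp only [Bool.true_and]
    rw [List.countP_cons]
    by_cases hik : PySem.List.pyGetD (PySem.List.pyGetD m i []) (k : Int) 0 == 1
    · have e0 : (if PySem.List.pyGetD (PySem.List.pyGetD m i []) (k : Int) 0 == 1 then 1 else 0) = 1 := by
        simp only [hik, if_true]
      rw [e0]
      have hpar : ∀ n : Nat, decide ((n + 1) % 2 = 1) = ! decide (n % 2 = 1) := by
        intro n; by_cases hp : n % 2 = 1 <;> simp [hp] <;> omega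
      rw [hpar, hik]
      cases co.getD k false <;>
        cases decide (t.countP (fun i => PySem.List.pyGetD (PySem.List.pyGetD m i []) (k : Int) 0 == 1) % 2 = 1) <;>
        rfl
    · have hb' : (PySem.List.pyGetD (PySem.List.pyGetD m i []) (k : Int) 0 == 1) = false :=
        Bool.eq_false_iff.mpr hik
      have e0 : (if PySem.List.pyGetD (PySem.List.pyGetD m i []) (k : Int) 0 == 1 then 1 else 0) = 0 := by
        rw [hb']; simp
      rw [e0, hb']
      simp

-- parity of a Nat count, written the way each port tests it
theorem pvParCast (n : Nat) : (((n : Int)) % 2 == 1) = decide (n % 2 = 1) := by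
  by_cases h : n % 2 = 1 <;> simp [h] <;> omega

theorem insere_paridade_spec : Claim_equal_insere_paridade := by
  intro m rows columns pl pc _ _
  unfold Spec_insere_paridade
  have hA : insere_paridade m rows columns pl pc = (pl + (((PySem.List.pyRange 0 rows 1).countP (fun i => ((((PySem.List.pyRange 0 columns 1).countP (fun j => PySem.List.pyGetD (PySem.List.pyGetD m i []) j 0 == 1) : Nat) : Int) % 2 == 1)) : Nat) : Int),
       pc + (((PySem.List.pyRange 0 columns 1).countP (fun i => ((((PySem.List.pyRange 0 rows 1).countP (fun j => PySem.List.pyGetD (PySem.List.pyGetD m j []) i 0 == 1) : Nat) : Int) % 2 == 1)) : Nat) : Int)) := by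
    conv_lhs => rw [insere_paridade]
    simp only [PySem.List.foldl_if_add_one]
    rw [pvLoopA (fun i => (((PySem.List.pyRange 0 columns 1).countP (fun j => PySem.List.pyGetD (PySem.List.pyGetD m i []) j 0 == 1) : Nat) : Int)) (PySem.List.pyRange 0 rows 1) 0 pl (by decide)]
    rw [pvLoopA (fun i => (((PySem.List.pyRange 0 rows 1).countP (fun j => PySem.List.pyGetD (PySem.List.pyGetD m j []) i 0 == 1) : Nat) : Int)) (PySem.List.pyRange 0 columns 1) 0 pc (by decide)]
    simp only [PySem.List.foldl_if_add_one]
  have hB : insere_paridade_alt m rows columns pl pc = (pl + (((PySem.List.pyRange 0 rows 1).countP (fun i => ((((PySem.List.pyRange 0 columns 1).countP (fun j => PySem.List.pyGetD (PySem.List.pyGetD m i []) j 0 == 1) : Nat) : Int) % 2 == 1)) : Nat) : Int),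
       pc + (((PySem.List.pyRange 0 columns 1).countP (fun i => ((((PySem.List.pyRange 0 rows 1).countP (fun j => PySem.List.pyGetD (PySem.List.pyGetD m j []) i 0 == 1) : Nat) : Int) % 2 == 1)) : Nat) : Int)) := by
    conv_lhs => rw [insere_paridade_alt]
    simp only [pvBInner, PySem.List.foldl_if_add_one, zero_add]
    rw [show List.foldl
        (fun (st : List Bool × Int) (i : Int) =>
          if ((((PySem.List.pyRange 0 columns 1).countP (fun j => PySem.List.pyGetD (PySem.List.pyGetD m i []) j 0 == 1) : Nat) : Int) % 2 == 1) = true then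
            ((fun (co : List Bool) (i : Int) => (PySem.List.pyRange 0 columns 1).foldl (fun co j => if PySem.List.pyGetD (PySem.List.pyGetD m i []) j 0 == 1 then co.set j.toNat (!(co.getD j.toNat false)) else co) co) st.1 i, st.2 + 1)
          else ((fun (co : List Bool) (i : Int) => (PySem.List.pyRange 0 columns 1).foldl (fun co j => if PySem.List.pyGetD (PySem.List.pyGetD m i []) j 0 == 1 then co.set j.toNat (!(co.getD j.toNat false)) else co) co) st.1 i, st.2))
        (List.replicate columns.toNat false, pl) (PySem.List.pyRange 0 rows 1)
      = List.foldl
        (fun (st : List Bool × Int) (i : Int) =>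
          ((fun (co : List Bool) (i : Int) => (PySem.List.pyRange 0 columns 1).foldl (fun co j => if PySem.List.pyGetD (PySem.List.pyGetD m i []) j 0 == 1 then co.set j.toNat (!(co.getD j.toNat false)) else co) co) st.1 i, if ((((PySem.List.pyRange 0 columns 1).countP (fun j => PySem.List.pyGetD (PySem.List.pyGetD m i []) j 0 == 1) : Nat) : Int) % 2 == 1) = true then st.2 + 1 else st.2))
        (List.replicate columns.toNat false, pl) (PySem.List.pyRange 0 rows 1)
      from PySem.List.foldl_congr_mem _ _ _ _ (by
        intro st i _
        by_cases h : ((((PySem.List.pyRange 0 columns 1).countP (fun j => PySem.List.pyGetD (PySem.List.pyGetD m i []) j 0 == 1) : Nat) : Int) % 2 == 1) = true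
        · simp [h]
        · simp [h])]
    rw [PySem.List.foldl_prod_mk (fun (co : List Bool) (i : Int) => (PySem.List.pyRange 0 columns 1).foldl (fun co j => if PySem.List.pyGetD (PySem.List.pyGetD m i []) j 0 == 1 then co.set j.toNat (!(co.getD j.toNat false)) else co) co)
      (fun (p : Int) (i : Int) => if ((((PySem.List.pyRange 0 columns 1).countP (fun j => PySem.List.pyGetD (PySem.List.pyGetD m i []) j 0 == 1) : Nat) : Int) % 2 == 1) = true then p + 1 else p)
      (PySem.List.pyRange 0 rows 1) (List.replicate columns.toNat false) pl]
    show (List.foldl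
        (fun p i => if ((((PySem.List.pyRange 0 columns 1).countP (fun j => PySem.List.pyGetD (PySem.List.pyGetD m i []) j 0 == 1) : Nat) : Int) % 2 == 1) = true then p + 1 else p)
        pl (PySem.List.pyRange 0 rows 1),
      pc + ((List.countP
        (fun x => (List.foldl (fun (co : List Bool) (i : Int) => (PySem.List.pyRange 0 columns 1).foldl (fun co j => if PySem.List.pyGetD (PySem.List.pyGetD m i []) j 0 == 1 then co.set j.toNat (!(co.getD j.toNat false)) else co) co) (List.replicate columns.toNat false) (PySem.List.pyRange 0 rows 1)).getD x.toNat false)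
        (PySem.List.pyRange 0 columns 1) : Nat) : Int)) = _
    rw [List.countP_congr (q := fun (x : Int) =>
        (((((PySem.List.pyRange 0 rows 1).countP (fun j => PySem.List.pyGetD (PySem.List.pyGetD m j []) x 0 == 1) : Nat) : Int)) % 2 == 1))
      ?_]
    · simp only [PySem.List.foldl_if_add_one]
    · intro x hx
      rw [PySem.List.mem_pyRange_one] at hx
      rw [pvRowsFold m columns (PySem.List.pyRange 0 rows 1) (List.replicate columns.toNat false) x.toNat (by simp) (by omega)]
      have hcast : ((x.toNat : Nat) : Int) = x := by omega
      rw [hcast]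
      have hrep : (List.replicate columns.toNat false).getD x.toNat false = false := by
        simp only [List.getD_eq_getElem?_getD, List.getElem?_replicate]
        split <;> rfl
      rw [hrep, Bool.false_xor]
      simp [pvParCast]
  rw [hA, hB]
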